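-- pv_equiv track=rewrite | github.com/rakib3421/AI_ESSAY_COACH | ai.py | normalize_essay_type
-- ===== SOURCE A (Python) =====
-- def normalize_essay_type(essay_type):
--     """
--     Normalize essay type to standard values to fix data truncation issues
--
--     Args:
--         essay_type (str): Raw essay type input
--
--     Returns:
--         str: Normalized essay type
--     """
--     if not essay_type:
--         return 'hybrid'
--
--     essay_type_lower = essay_type.lower().strip()
--
--     # Map variations to standard types
--     if any(word in essay_type_lower for word in ['argument', 'persuasive', 'opinion', 'convince']):
--         return 'argumentative'
--     elif any(word in essay_type_lower for word in ['narrative', 'story', 'personal', 'experience']):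
--         return 'narrative'
--     elif any(word in essay_type_lower for word in ['literary', 'literature', 'analysis', 'critique']):
--         return 'literary_analysis'
--     elif any(word in essay_type_lower for word in ['compare', 'contrast', 'comparison']):
--         return 'comparative'
--     elif any(word in essay_type_lower for word in ['expository', 'explain', 'informative', 'inform']):
--         return 'expository'
--     else:
--         return 'hybrid'
-- ===== SOURCE B (Python) =====
-- _KEYWORD_LABELS = [
--     ('argument', 'argumentative'), ('persuasive', 'argumentative'),
--     ('opinion', 'argumentative'), ('convince', 'argumentative'),
--     ('narrative', 'narrative'), ('story', 'narrative'),
--     ('personal', 'narrative'), ('experience', 'narrative'),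
--     ('literary', 'literary_analysis'), ('literature', 'literary_analysis'),
--     ('analysis', 'literary_analysis'), ('critique', 'literary_analysis'),
--     ('compare', 'comparative'), ('contrast', 'comparative'),
--     ('comparison', 'comparative'),
--     ('expository', 'expository'), ('explain', 'expository'),
--     ('informative', 'expository'), ('inform', 'expository'),
-- ]
-- _PRIORITY = ['argumentative', 'narrative', 'literary_analysis', 'comparative', 'expository']
--
-- def normalize_essay_type(essay_type):
--     if not essay_type:
--         return 'hybrid'
--     s = essay_type.lower().strip()
--     found = set()
--     for i in range(len(s)):
--         for word, label in _KEYWORD_LABELS: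
--             if s.startswith(word, i):
--                 found.add(label)
--     for label in _PRIORITY:
--         if label in found:
--             return label
--     return 'hybrid'
-- ===== Notes on version B (the rewrite author's own statement) =====
-- stated objective: alternative
-- what changed: Instead of A's if/elif cascade of per-group substring-membership tests, B makes one positional scan over the lowered string, collecting into a set every category whose keyword starts at some index, and then resolves the set against a fixed priority order.
import Mathlib
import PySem

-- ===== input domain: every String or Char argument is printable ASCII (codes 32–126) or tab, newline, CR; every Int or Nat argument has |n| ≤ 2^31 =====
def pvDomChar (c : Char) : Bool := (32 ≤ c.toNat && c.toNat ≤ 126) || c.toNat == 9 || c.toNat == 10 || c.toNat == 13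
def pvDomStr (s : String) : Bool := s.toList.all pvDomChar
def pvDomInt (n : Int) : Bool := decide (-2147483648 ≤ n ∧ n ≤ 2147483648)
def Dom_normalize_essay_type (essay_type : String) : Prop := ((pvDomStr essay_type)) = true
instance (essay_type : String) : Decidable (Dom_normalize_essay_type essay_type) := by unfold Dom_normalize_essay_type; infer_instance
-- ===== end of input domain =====

-- B replaces A's if/elif cascade of substring tests by a single positional scan collecting all matched
-- categories into a set, then a priority resolution (alternative decomposition, same cost).


-- ===== PORT A =====
def normalize_essay_type (essay_type : String) : String :=
  if essay_type = "" then "hybrid"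
  else
    let essay_type_lower := PySem.Str.strip (PySem.Str.lower essay_type)
    if (["argument", "persuasive", "opinion", "convince"].any (fun word => PySem.Str.isIn word essay_type_lower)) then "argumentative"
    else if (["narrative", "story", "personal", "experience"].any (fun word => PySem.Str.isIn word essay_type_lower)) then "narrative"
    else if (["literary", "literature", "analysis", "critique"].any (fun word => PySem.Str.isIn word essay_type_lower)) then "literary_analysis"
    else if (["compare", "contrast", "comparison"].any (fun word => PySem.Str.isIn word essay_type_lower)) then "comparative"
    else if (["expository", "explain", "informative", "inform"].any (fun word => PySem.Str.isIn word essay_type_lower)) then "expository"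
    else "hybrid"

-- ===== PORT B =====
-- flat (keyword, label) list, as in Source B
def pvKwLabels : List (List Char × String) :=
  [("argument".toList, "argumentative"), ("persuasive".toList, "argumentative"),
   ("opinion".toList, "argumentative"), ("convince".toList, "argumentative"),
   ("narrative".toList, "narrative"), ("story".toList, "narrative"),
   ("personal".toList, "narrative"), ("experience".toList, "narrative"),
   ("literary".toList, "literary_analysis"), ("literature".toList, "literary_analysis"),
   ("analysis".toList, "literary_analysis"), ("critique".toList, "literary_analysis"),
   ("compare".toList, "comparative"), ("contrast".toList, "comparative"),
   ("comparison".toList, "comparative"),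
   ("expository".toList, "expository"), ("explain".toList, "expository"),
   ("informative".toList, "expository"), ("inform".toList, "expository")]

-- for i in range(len(s)): for word, label in _KEYWORD_LABELS: if s.startswith(word, i): found.add(label)
def pvScan (s : List Char) : PySem.Set String :=
  (PySem.List.pyRange 0 s.length 1).foldl
    (fun found i =>
      pvKwLabels.foldl
        (fun found p =>
          if PySem.Chars.startswith (s.drop i.toNat) p.1 then PySem.Set.add found p.2 else found)
        found)
    PySem.Set.empty

-- for label in _PRIORITY: if label in found: return label ... return 'hybrid'
def pvPick (found : PySem.Set String) : List String → String
  | [] => "hybrid"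
  | l :: rest => if PySem.Set.contains found l then l else pvPick found rest

def normalize_essay_type_alt (essay_type : String) : String :=
  if essay_type = "" then "hybrid"
  else
    pvPick (pvScan (PySem.Str.strip (PySem.Str.lower essay_type)).toList)
      ["argumentative", "narrative", "literary_analysis", "comparative", "expository"]

-- ===== PRECONDITION & SPEC =====
def Spec_normalize_essay_type (essay_type : String) (out : String) : Prop := out = normalize_essay_type_alt essay_type
instance (essay_type : String) (out : String) : Decidable (Spec_normalize_essay_type essay_type out) := by unfold Spec_normalize_essay_type; infer_instance

-- ===== CLAIM (what is proved, stated in full; the proofs are below) =====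
def Claim_equal_normalize_essay_type : Prop := ∀ (essay_type : String), Dom_normalize_essay_type essay_type → Spec_normalize_essay_type essay_type (normalize_essay_type essay_type)

-- ===== LEMMAS AND PROOFS =====

-- membership in a conditional-add fold
theorem pv_mem_foldl_ite_add {α β : Type} [BEq β] [LawfulBEq β]
    (l : List α) (c : α → Bool) (g : α → β) (found : PySem.Set β) (x : β) :
    (x ∈ l.foldl (fun f a => if c a then PySem.Set.add f (g a) else f) found) ↔
      x ∈ found ∨ ∃ a ∈ l, c a = true ∧ g a = x := by
  induction l generalizing found with
  | nil => simp
  | cons a t ih =>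
    simp only [List.foldl_cons, List.mem_cons]
    by_cases h : c a = true <;> (simp [h, ih, PySem.Set.mem_add]; try tauto)

-- membership in the outer fold of the scan
theorem pv_mem_outer (rng : List Int) (s : List Char) (found : PySem.Set String) (x : String) :
    (x ∈ rng.foldl
        (fun found i =>
          pvKwLabels.foldl
            (fun found p =>
              if PySem.Chars.startswith (s.drop i.toNat) p.1 then PySem.Set.add found p.2 else found)
            found)
        found) ↔
      x ∈ found ∨ ∃ i ∈ rng, ∃ p ∈ pvKwLabels,
        PySem.Chars.startswith (s.drop i.toNat) p.1 = true ∧ p.2 = x := by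
  induction rng generalizing found with
  | nil => simp
  | cons i t ih =>
    simp only [List.foldl_cons, List.mem_cons]
    rw [ih]
    rw [pv_mem_foldl_ite_add pvKwLabels
      (fun p => PySem.Chars.startswith (s.drop i.toNat) p.1) (fun p => p.2)]
    constructor
    · rintro (((h | ⟨p, hp, hc, hg⟩) ) | ⟨j, hj, p, hp, hc, hg⟩)
      · exact Or.inl h
      · exact Or.inr ⟨i, Or.inl rfl, p, hp, hc, hg⟩
      · exact Or.inr ⟨j, Or.inr hj, p, hp, hc, hg⟩
    · rintro (h | ⟨j, (rfl | hj), p, hp, hc, hg⟩)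
      · exact Or.inl (Or.inl h)
      · exact Or.inl (Or.inr ⟨p, hp, hc, hg⟩)
      · exact Or.inr ⟨j, hj, p, hp, hc, hg⟩

-- membership in the scan: some keyword of label x starts at some scanned position
theorem pv_mem_pvScan (s : List Char) (x : String) :
    (x ∈ pvScan s) ↔
      ∃ p ∈ pvKwLabels, p.2 = x ∧ PySem.Chars.isIn p.1 s = true := by
  unfold pvScan
  rw [pv_mem_outer]
  simp only [PySem.Set.empty, List.not_mem_nil, false_or]
  constructor
  · rintro ⟨i, hi, p, hp, hc, hg⟩
    refine ⟨p, hp, hg, ?_⟩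
    rw [← PySem.Chars.exists_prefix_drop_iff_isIn]
    exact ⟨i.toNat, (PySem.Chars.startswith_iff _ _).mp hc⟩
  · rintro ⟨p, hp, hg, hin⟩
    obtain ⟨j, hj⟩ := (PySem.Chars.exists_prefix_drop_iff_isIn _ _).mpr hin
    have hpne : p.1 ≠ [] := by
      revert hp; unfold pvKwLabels; intro hp; fin_cases hp <;> simp
    have hjlt : j < s.length := by
      by_contra hge
      rw [not_lt] at hge
      rw [List.drop_eq_nil_of_le hge] at hj
      exact hpne (List.prefix_nil.mp hj)
    refine ⟨(j : Int), ?_, p, hp, ?_, hg⟩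
    · rw [PySem.List.mem_pyRange_one]
      constructor
      · exact Int.natCast_nonneg j
      · exact_mod_cast hjlt
    · rw [PySem.Chars.startswith_iff]
      simpa using hj


-- the scanned set, queried per label, is A's per-group any-substring test
theorem pv_contains_arg (t : List Char) :
    PySem.Set.contains (pvScan t) "argumentative" =
      (["argument", "persuasive", "opinion", "convince"] : List String).any
        (fun w => PySem.Chars.isIn w.toList t) := by
  rw [Bool.eq_iff_iff, PySem.Set.contains_iff, pv_mem_pvScan]
  simp [pvKwLabels]

theorem pv_contains_nar (t : List Char) :
    PySem.Set.contains (pvScan t) "narrative" =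
      (["narrative", "story", "personal", "experience"] : List String).any
        (fun w => PySem.Chars.isIn w.toList t) := by
  rw [Bool.eq_iff_iff, PySem.Set.contains_iff, pv_mem_pvScan]
  simp [pvKwLabels]

theorem pv_contains_lit (t : List Char) :
    PySem.Set.contains (pvScan t) "literary_analysis" =
      (["literary", "literature", "analysis", "critique"] : List String).any
        (fun w => PySem.Chars.isIn w.toList t) := by
  rw [Bool.eq_iff_iff, PySem.Set.contains_iff, pv_mem_pvScan]
  simp [pvKwLabels]

theorem pv_contains_comp (t : List Char) :
    PySem.Set.contains (pvScan t) "comparative" =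
      (["compare", "contrast", "comparison"] : List String).any
        (fun w => PySem.Chars.isIn w.toList t) := by
  rw [Bool.eq_iff_iff, PySem.Set.contains_iff, pv_mem_pvScan]
  simp [pvKwLabels]

theorem pv_contains_exp (t : List Char) :
    PySem.Set.contains (pvScan t) "expository" =
      (["expository", "explain", "informative", "inform"] : List String).any
        (fun w => PySem.Chars.isIn w.toList t) := by
  rw [Bool.eq_iff_iff, PySem.Set.contains_iff, pv_mem_pvScan]
  simp [pvKwLabels]

-- ===== VERDICT (by name: the statement is the Claim_ definition above) =====
theorem normalize_essay_type_spec : Claim_equal_normalize_essay_type := by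
  intro e _
  unfold Spec_normalize_essay_type normalize_essay_type normalize_essay_type_alt
  by_cases h : e = ""
  · simp [h]
  · rw [if_neg h, if_neg h]
    simp only [pvPick, pv_contains_arg, pv_contains_nar, pv_contains_lit, pv_contains_comp,
      pv_contains_exp, PySem.Str.isIn_eq]
    rfl
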